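-- pv_equiv track=rewrite | github.com/jlyden/advent-code-2022 | warmup/python/solution-03.py | determine_binary_rates
-- ===== SOURCE A (Python) =====
-- def determine_binary_rates(zero_count, line_count):
--     gamma_rate_string = ''
--     epsilon_rate_string = ''
--     halfway = int(line_count / 2)
--     for value in zero_count:
--         if value >= halfway:
--             gamma_rate_string += '0'
--             epsilon_rate_string += '1'
--         else:
--             gamma_rate_string += '1'
--             epsilon_rate_string += '0'
--     return gamma_rate_string, epsilon_rate_string
-- ===== SOURCE B (Python) =====
-- def determine_binary_rates(zero_count, line_count):
--     # Pack the rates into one integer: bit = 1 where value < halfway (gamma bit),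
--     # complement via XOR with a full mask, then unpack both integers to strings.
--     halfway = int(line_count / 2)
--     n = len(zero_count)
--     g = 0
--     for value in zero_count:
--         g = 2 * g + (0 if value >= halfway else 1)
--     e = g ^ ((1 << n) - 1)
--     gamma = ''.join('1' if (g >> (n - 1 - i)) & 1 else '0' for i in range(n))
--     epsilon = ''.join('1' if (e >> (n - 1 - i)) & 1 else '0' for i in range(n))
--     return gamma, epsilon
-- ===== Notes on version B (the rewrite author's own statement) =====
-- stated objective: alternative
-- what changed: Instead of accumulating two strings per element, B packs the gamma bits into a single integer, complements it with one XOR against a full mask, and unpacks both integers to bit strings by shift-and-mask extraction.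
import Mathlib
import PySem

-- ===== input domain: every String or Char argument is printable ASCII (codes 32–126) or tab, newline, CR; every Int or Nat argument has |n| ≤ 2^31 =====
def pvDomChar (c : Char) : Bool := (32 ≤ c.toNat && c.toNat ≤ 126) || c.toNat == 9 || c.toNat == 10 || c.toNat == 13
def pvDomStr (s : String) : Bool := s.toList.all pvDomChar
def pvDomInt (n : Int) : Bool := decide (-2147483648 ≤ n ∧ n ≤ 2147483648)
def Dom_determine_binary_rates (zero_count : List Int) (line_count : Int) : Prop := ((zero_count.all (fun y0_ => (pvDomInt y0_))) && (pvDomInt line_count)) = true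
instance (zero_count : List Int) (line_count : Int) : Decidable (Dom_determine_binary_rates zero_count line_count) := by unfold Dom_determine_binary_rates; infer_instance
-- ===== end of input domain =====

-- B packs the gamma bits into one integer, complements it with a single XOR, and unpacks both
-- integers to bit strings by shift-and-mask extraction (objective: alternative algorithm, same result).

-- ===== PORT A =====
-- A: lockstep accumulation of both strings in one loop.
def determine_binary_rates (zero_count : List Int) (line_count : Int) : String × String :=
  let halfway : Int := line_count.tdiv 2  -- int(line_count / 2): float div by 2 is exact on the domain, int truncates toward zero
  zero_count.foldl
    (fun (acc : String × String) value =>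
      if value ≥ halfway then (acc.1 ++ "0", acc.2 ++ "1")
      else (acc.1 ++ "1", acc.2 ++ "0"))
    ("", "")

-- ===== PORT B =====
-- B: pack bits into an integer g (1 where value < halfway), e = g XOR full mask, unpack both.
def determine_binary_rates_alt (zero_count : List Int) (line_count : Int) : String × String :=
  let halfway : Int := line_count.tdiv 2
  let n : Nat := zero_count.length
  let g : Nat := zero_count.foldl (fun a value => 2 * a + (if value ≥ halfway then 0 else 1)) 0
  let e : Nat := g ^^^ ((1 <<< n) - 1)
  let gamma : String := String.ofList ((List.range n).map (fun i => if (g >>> (n - 1 - i)) &&& 1 = 1 then '1' else '0'))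
  let epsilon : String := String.ofList ((List.range n).map (fun i => if (e >>> (n - 1 - i)) &&& 1 = 1 then '1' else '0'))
  (gamma, epsilon)

-- ===== PRECONDITION & SPEC =====
def Spec_determine_binary_rates (zero_count : List Int) (line_count : Int) (out : String × String) : Prop := out = determine_binary_rates_alt zero_count line_count
instance (zero_count : List Int) (line_count : Int) (out : String × String) : Decidable (Spec_determine_binary_rates zero_count line_count out) := by unfold Spec_determine_binary_rates; infer_instance

-- ===== CLAIM (what is proved, stated in full; the proofs are below) =====
def Claim_equal_determine_binary_rates : Prop := ∀ (zero_count : List Int) (line_count : Int), Dom_determine_binary_rates zero_count line_count → Spec_determine_binary_rates zero_count line_count (determine_binary_rates zero_count line_count)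

-- ===== LEMMAS AND PROOFS =====

-- A's loop produces the two per-element maps.
theorem pv_foldl_char (h : Int) :
    ∀ (zc : List Int) (s t : List Char),
      zc.foldl
        (fun (acc : String × String) value =>
          if value ≥ h then (acc.1 ++ "0", acc.2 ++ "1")
          else (acc.1 ++ "1", acc.2 ++ "0"))
        (String.ofList s, String.ofList t)
      = (String.ofList (s ++ zc.map (fun v => if v ≥ h then '0' else '1')),
         String.ofList (t ++ zc.map (fun v => if v ≥ h then '1' else '0'))) := by
  intro zc
  induction zc with
  | nil => intro s t; simp
  | cons x xs ih =>
    intro s t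
    by_cases hx : x ≥ h
    · simpa [hx, List.foldl_cons, String.ofList_append] using ih (s ++ ['0']) (t ++ ['1'])
    · simpa [hx, List.foldl_cons, String.ofList_append] using ih (s ++ ['1']) (t ++ ['0'])

-- Bit i (from the left) of the packed integer is 1 iff zc[i] < h.
theorem pv_fold_bit (h : Int) :
    ∀ (zc : List Int) (i : Nat) (hi : i < zc.length),
      (zc.foldl (fun a value => 2 * a + (if value ≥ h then 0 else 1)) 0)
        / 2 ^ (zc.length - 1 - i) % 2 = (if zc[i] ≥ h then 0 else 1) := by
  intro zc
  induction zc using List.reverseRecOn with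
  | nil => intro i hi; simp at hi
  | append_singleton xs x ih =>
    intro i hi
    have hb : (if x ≥ h then (0:Nat) else 1) ≤ 1 := by split <;> omega
    simp only [List.foldl_append, List.foldl_cons, List.foldl_nil] at *
    by_cases hlast : i = xs.length
    · subst hlast
      simp only [List.getElem_concat_length, List.length_append, List.length_cons,
        List.length_nil]
      have : xs.length + 1 - 1 - xs.length = 0 := by omega
      rw [this]
      simp only [pow_zero, Nat.div_one]
      omega
    · have hi' : i < xs.length := by
        simp only [List.length_append, List.length_cons, List.length_nil] at hi; omega
      rw [List.getElem_append_left hi']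
      have hlen : (xs ++ [x]).length - 1 - i = (xs.length - 1 - i) + 1 := by
        simp only [List.length_append, List.length_cons, List.length_nil]; omega
      rw [hlen, pow_succ, mul_comm (2 ^ (xs.length - 1 - i)) 2, ← Nat.div_div_eq_div_mul]
      have hdiv : (2 * (xs.foldl (fun a value => 2 * a + (if value ≥ h then 0 else 1)) 0)
          + (if x ≥ h then (0:Nat) else 1)) / 2
          = xs.foldl (fun a value => 2 * a + (if value ≥ h then 0 else 1)) 0 := by omega
      rw [hdiv]
      exact ih i hi'

-- XOR with the full mask flips every bit below n.
theorem pv_xor_bit (g n k : Nat) (hk : k < n) :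
    (g ^^^ (2 ^ n - 1)) / 2 ^ k % 2 = 1 - g / 2 ^ k % 2 := by
  have h2 : (2 ^ n - 1).testBit k = true := by
    simp [Nat.testBit_two_pow_sub_one, hk]
  have h1 : (g ^^^ (2 ^ n - 1)).testBit k = !(g.testBit k) := by
    rw [Nat.testBit_xor, h2, Bool.xor_true]
  have m1 : (g ^^^ (2 ^ n - 1)) / 2 ^ k % 2 < 2 := Nat.mod_lt _ (by omega)
  by_cases hg : g.testBit k
  · have hg2 : g / 2 ^ k % 2 = 1 := by
      have e2 : g.testBit k = decide (g / 2 ^ k % 2 = 1) := Nat.testBit_eq_decide_div_mod_eq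
      rw [hg] at e2
      exact of_decide_eq_true e2.symm
    have hx : (g ^^^ (2 ^ n - 1)).testBit k = false := by rw [h1, hg]; rfl
    have e1 : (g ^^^ (2 ^ n - 1)).testBit k
        = decide ((g ^^^ (2 ^ n - 1)) / 2 ^ k % 2 = 1) := Nat.testBit_eq_decide_div_mod_eq
    rw [hx] at e1
    have hne := of_decide_eq_false e1.symm
    omega
  · have hg2 : g / 2 ^ k % 2 ≠ 1 := by
      have e2 : g.testBit k = decide (g / 2 ^ k % 2 = 1) := Nat.testBit_eq_decide_div_mod_eq
      rw [Bool.eq_false_iff.mpr hg] at e2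
      exact of_decide_eq_false e2.symm
    have hx : (g ^^^ (2 ^ n - 1)).testBit k = true := by
      rw [h1, Bool.eq_false_iff.mpr hg]; rfl
    have e1 : (g ^^^ (2 ^ n - 1)).testBit k
        = decide ((g ^^^ (2 ^ n - 1)) / 2 ^ k % 2 = 1) := Nat.testBit_eq_decide_div_mod_eq
    rw [hx] at e1
    have heq := of_decide_eq_true e1.symm
    omega

-- ===== VERDICT (by name: the statement is the Claim_ definition above) =====
theorem determine_binary_rates_spec : Claim_equal_determine_binary_rates := by
  intro zc lc _
  unfold Spec_determine_binary_rates determine_binary_rates determine_binary_rates_alt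
  rw [show ("" : String) = String.ofList [] from rfl, pv_foldl_char]
  simp only [List.nil_append]
  set h := lc.tdiv 2 with hh
  set n := zc.length with hn
  set g := zc.foldl (fun a value => 2 * a + (if value ≥ h then 0 else 1)) 0 with hg
  have hmask : (1 <<< n) - 1 = 2 ^ n - 1 := by
    rw [Nat.shiftLeft_eq, one_mul]
  refine Prod.ext ?_ ?_ <;> simp only [] <;> congr 1
  · -- gamma
    apply List.ext_getElem
    · simp [hn]
    · intro i h1 h2
      simp only [List.getElem_map, List.getElem_range]
      rw [Nat.shiftRight_eq_div_pow, Nat.and_one_is_mod]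
      have hi : i < zc.length := by simpa [hn] using h1
      rw [hg, pv_fold_bit h zc i hi]
      by_cases hv : zc[i] ≥ h <;> simp [hv]
  · -- epsilon
    apply List.ext_getElem
    · simp [hn]
    · intro i h1 h2
      simp only [List.getElem_map, List.getElem_range]
      rw [Nat.shiftRight_eq_div_pow, Nat.and_one_is_mod, hmask]
      have hi : i < zc.length := by simpa [hn] using h1
      have hk : n - 1 - i < n := by omega
      rw [pv_xor_bit g n (n - 1 - i) hk, hg, pv_fold_bit h zc i hi]
      by_cases hv : zc[i] ≥ h <;> simp [hv]
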